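-- pv_equiv track=rewrite | github.com/yudai-patronai/problembook | problems/graphs/simple/sources_and_sinks/test_generator.py | solution
-- ===== SOURCE A (Python) =====
-- def solution(n, A):
--     istok = []
--     stok = []
--
--     for i in range(n):
--         if sum(A[i]) == 0:
--             stok.append(i+1)
--     stok.sort()
--
--     for i in range(n):
--         if sum([sub_list[i] for sub_list in A]) == 0:
--             istok.append(i+1)
--     istok.sort()
--
--     return ' '.join(map(str, istok)), ' '.join(map(str, stok))
-- ===== SOURCE B (Python) =====
-- def solution(n, A):
--     # One pass over the matrix builds all column totals at once; row totals stay sum(A[i]).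
--     csum = [0] * n
--     for row in A:
--         csum = [c + row[j] for j, c in enumerate(csum)]
--     istok = ' '.join(str(j + 1) for j in range(n) if csum[j] == 0)
--     stok = ' '.join(str(i + 1) for i in range(n) if sum(A[i]) == 0)
--     return istok, stok
-- ===== Notes on version B (the rewrite author's own statement) =====
-- stated objective: alternative
-- what changed: A rescans the matrix column by column, building a fresh comprehension list per column; B does one pass over the rows that accumulates all n column totals at once, then filters range(n) (the 1-based indices are already increasing, so the sorts disappear).
-- outside the precondition, e.g. on solution(1, []): A raises IndexError, B raises IndexError; on solution(2, [[0, 0], [1]]): A raises IndexError, B raises IndexError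
import Mathlib
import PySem

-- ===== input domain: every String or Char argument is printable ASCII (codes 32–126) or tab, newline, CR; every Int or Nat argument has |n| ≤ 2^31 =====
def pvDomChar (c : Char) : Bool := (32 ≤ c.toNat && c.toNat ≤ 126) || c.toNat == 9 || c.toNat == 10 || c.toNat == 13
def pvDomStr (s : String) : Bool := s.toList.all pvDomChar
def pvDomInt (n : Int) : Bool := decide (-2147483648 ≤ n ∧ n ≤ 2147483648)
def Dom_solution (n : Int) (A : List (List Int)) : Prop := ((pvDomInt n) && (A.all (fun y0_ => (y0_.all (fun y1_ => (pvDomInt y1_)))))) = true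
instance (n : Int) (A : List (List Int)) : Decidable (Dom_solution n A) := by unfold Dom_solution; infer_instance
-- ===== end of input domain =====

-- B replaces A's n repeated column-by-column rescans of the matrix by a single pass that
-- maintains all n column totals at once; same return value (alternative decomposition).

-- ===== PORT A =====
def solution (n : Int) (A : List (List Int)) : String × String :=
  let istok : List Int := []
  let stok : List Int :=
    (PySem.List.pyRange 0 n 1).foldl
      (fun acc i => if (PySem.List.pyGetD A i []).sum == 0 then acc ++ [i + 1] else acc) []
  let stok := PySem.List.sorted stok (fun x => x) false
  let istok :=
    (PySem.List.pyRange 0 n 1).foldl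
      (fun acc i => if (A.map (fun row => PySem.List.pyGetD row i 0)).sum == 0
                    then acc ++ [i + 1] else acc) istok
  let istok := PySem.List.sorted istok (fun x => x) false
  (PySem.Str.join " " (istok.map PySem.Int.toStr),
   PySem.Str.join " " (stok.map PySem.Int.toStr))

-- ===== PORT B =====
def solution_alt (n : Int) (A : List (List Int)) : String × String :=
  let csum0 : List Int := List.replicate n.toNat 0
  let csum : List Int :=
    A.foldl (fun cs row =>
      (PySem.List.enumerate cs).map (fun p => p.2 + PySem.List.pyGetD row p.1 0)) csum0
  let istok := PySem.Str.join " "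
    (((PySem.List.pyRange 0 n 1).filter (fun j => PySem.List.pyGetD csum j 0 == 0)).map
      (fun j => PySem.Int.toStr (j + 1)))
  let stok := PySem.Str.join " "
    (((PySem.List.pyRange 0 n 1).filter (fun i => (PySem.List.pyGetD A i []).sum == 0)).map
      (fun i => PySem.Int.toStr (i + 1)))
  (istok, stok)

-- ===== PRECONDITION & SPEC =====
-- Pre_ excludes exactly the inputs where Python A raises IndexError: n rows must exist and
-- every row must have at least n entries (for n ≤ 0 both conditions hold vacuously).
def Pre_solution (n : Int) (A : List (List Int)) : Prop :=
  n ≤ (A.length : Int) ∧ ∀ row ∈ A, n ≤ (row.length : Int)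
instance (n : Int) (A : List (List Int)) : Decidable (Pre_solution n A) := by
  unfold Pre_solution; infer_instance
def pvWitness_solution : Int × List (List Int) := (2, [[1, -1], [-1, 1]])
def Spec_solution (n : Int) (A : List (List Int)) (out : String × String) : Prop := out = solution_alt n A
instance (n : Int) (A : List (List Int)) (out : String × String) : Decidable (Spec_solution n A out) := by unfold Spec_solution; infer_instance

-- ===== CLAIM (what is proved, stated in full; the proofs are below) =====
def Claim_equal_solution : Prop := ∀ (n : Int) (A : List (List Int)), Dom_solution n A → Pre_solution n A → Spec_solution n A (solution n A)

-- ===== LEMMAS AND PROOFS =====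

-- one step of B's fold keeps the length
theorem step_length (cs : List Int) (row : List Int) :
    ((PySem.List.enumerate cs).map (fun p => p.2 + PySem.List.pyGetD row p.1 0)).length
      = cs.length := by
  simp [PySem.List.length_enumerate]

-- B's fold computes, at each index, the initial entry plus the column sum over all rows
theorem csum_spec (A : List (List Int)) (cs : List Int) :
    (A.foldl (fun cs row =>
        (PySem.List.enumerate cs).map (fun p => p.2 + PySem.List.pyGetD row p.1 0)) cs).length
      = cs.length ∧
    ∀ (j : Nat) (hj : j < cs.length) (hj' : _),
      (A.foldl (fun cs row =>
          (PySem.List.enumerate cs).map (fun p => p.2 + PySem.List.pyGetD row p.1 0)) cs)[j]'hj'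
        = cs[j]'hj + (A.map (fun row => PySem.List.pyGetD row (j : Int) 0)).sum := by
  induction A generalizing cs with
  | nil => simp
  | cons row A ih =>
    simp only [List.foldl_cons]
    obtain ⟨hlen, hval⟩ := ih ((PySem.List.enumerate cs).map
      (fun p => p.2 + PySem.List.pyGetD row p.1 0))
    refine ⟨by rw [hlen, step_length], ?_⟩
    intro j hj hj'
    have hj2 : j < ((PySem.List.enumerate cs).map
        (fun p => p.2 + PySem.List.pyGetD row p.1 0)).length := by
      rw [step_length]; exact hj
    rw [hval j hj2]
    simp [PySem.List.getElem_enumerate, List.map_cons, List.sum_cons]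
    ring

-- the already-increasing output of the append-if loop: sorting is the identity
theorem sorted_filter_map_range (n : Int) (p : Int → Bool) :
    PySem.List.sorted (((PySem.List.pyRange 0 n 1).filter p).map (fun i => i + 1))
        (fun x => x) false
      = ((PySem.List.pyRange 0 n 1).filter p).map (fun i => i + 1) := by
  apply PySem.List.sorted_eq_self_of_pairwise
  have h : ((PySem.List.pyRange 0 n 1).filter p).Pairwise (fun a b => a < b) :=
    List.Pairwise.filter _ (PySem.List.pairwise_lt_pyRange_one 0 n)
  exact List.Pairwise.map _ (fun a b hab => by omega) h

-- ===== VERDICT (by name: the statement is the Claim_ definition above) =====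
theorem solution_spec : Claim_equal_solution := by
  intro n A _ _
  unfold Spec_solution solution solution_alt
  simp only [PySem.List.foldl_append_if, List.nil_append]
  rw [sorted_filter_map_range, sorted_filter_map_range]
  have hfilt :
      (PySem.List.pyRange 0 n 1).filter
          (fun j => PySem.List.pyGetD
            (A.foldl (fun cs row =>
              (PySem.List.enumerate cs).map (fun p => p.2 + PySem.List.pyGetD row p.1 0))
              (List.replicate n.toNat 0)) j 0 == 0)
        = (PySem.List.pyRange 0 n 1).filter
            (fun i => (A.map (fun row => PySem.List.pyGetD row i 0)).sum == 0) := by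
    apply List.filter_congr
    intro j hj
    have hmem := (PySem.List.mem_pyRange_one).1 hj
    obtain ⟨hspec_len, hspec⟩ := csum_spec A (List.replicate n.toNat 0)
    have hjn : j.toNat < (List.replicate n.toNat (0 : Int)).length := by
      simp; omega
    have hjn' : j.toNat < (A.foldl (fun cs row =>
        (PySem.List.enumerate cs).map (fun p => p.2 + PySem.List.pyGetD row p.1 0))
        (List.replicate n.toNat 0)).length := by rw [hspec_len]; exact hjn
    have hget := PySem.List.pyGetD_eq_getElem (xs := (A.foldl (fun cs row =>
        (PySem.List.enumerate cs).map (fun p => p.2 + PySem.List.pyGetD row p.1 0))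
        (List.replicate n.toNat 0))) (i := j) (d := 0) hmem.1 (by
      rw [hspec_len]; simp; omega)
    rw [hget, hspec j.toNat hjn hjn']
    have : ((j.toNat : Int)) = j := Int.toNat_of_nonneg hmem.1
    simp [this]
  rw [hfilt]
  simp [List.map_map, Function.comp_def]
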